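-- pv_equiv track=rewrite | github.com/Anupamakannur/Hackthon | utils/validators.py | validate_job_description
-- ===== SOURCE A (Python) =====
-- from typing import Dict, List, Optional, Any, Tuple
--
-- def validate_job_description(job_data: Dict[str, Any]) -> Tuple[bool, str]:
--     """
--     Validate job description data
--
--     Args:
--         job_data: Job description data to validate
--
--     Returns:
--         Tuple of (is_valid, error_message)
--     """
--     required_fields = ['title', 'company', 'description', 'requirements']
--
--     for field in required_fields:
--         if not job_data.get(field):
--             return False, f"{field.title()} is required"
--
--     # Validate title length
--     if len(job_data['title']) > 200:
--         return False, "Job title must be less than 200 characters"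
--
--     # Validate company name
--     if len(job_data['company']) > 100:
--         return False, "Company name must be less than 100 characters"
--
--     # Validate description length
--     if len(job_data['description']) < 50:
--         return False, "Job description must be at least 50 characters long"
--
--     if len(job_data['description']) > 10000:
--         return False, "Job description must be less than 10,000 characters"
--
--     # Validate requirements length
--     if len(job_data['requirements']) < 20:
--         return False, "Job requirements must be at least 20 characters long"
--
--     if len(job_data['requirements']) > 5000:
--         return False, "Job requirements must be less than 5,000 characters"
--
--     return True, ""
-- ===== SOURCE B (Python) =====
-- def validate_job_description(job_data):
--     fields = ('title', 'company', 'description', 'requirements')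
--     n = {f: len(job_data.get(f) or '') for f in fields}
--     failures = [f"{f.title()} is required" for f in fields if not job_data.get(f)]
--     failures += [msg for bad, msg in (
--         (n['title'] > 200, "Job title must be less than 200 characters"),
--         (n['company'] > 100, "Company name must be less than 100 characters"),
--         (n['description'] < 50, "Job description must be at least 50 characters long"),
--         (n['description'] > 10000, "Job description must be less than 10,000 characters"),
--         (n['requirements'] < 20, "Job requirements must be at least 20 characters long"),
--         (n['requirements'] > 5000, "Job requirements must be less than 5,000 characters"),
--     ) if bad]
--     return (not failures, failures[0] if failures else "")
-- ===== Notes on version B (the rewrite author's own statement) =====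
-- stated objective: alternative
-- what changed: Instead of A's cascade of early returns, B evaluates every check up front, collects ALL violated messages into one failures list (required-field messages first, then the six length messages in A's order), and reports validity as emptiness of that list with its first element as the message.
import Mathlib
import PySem

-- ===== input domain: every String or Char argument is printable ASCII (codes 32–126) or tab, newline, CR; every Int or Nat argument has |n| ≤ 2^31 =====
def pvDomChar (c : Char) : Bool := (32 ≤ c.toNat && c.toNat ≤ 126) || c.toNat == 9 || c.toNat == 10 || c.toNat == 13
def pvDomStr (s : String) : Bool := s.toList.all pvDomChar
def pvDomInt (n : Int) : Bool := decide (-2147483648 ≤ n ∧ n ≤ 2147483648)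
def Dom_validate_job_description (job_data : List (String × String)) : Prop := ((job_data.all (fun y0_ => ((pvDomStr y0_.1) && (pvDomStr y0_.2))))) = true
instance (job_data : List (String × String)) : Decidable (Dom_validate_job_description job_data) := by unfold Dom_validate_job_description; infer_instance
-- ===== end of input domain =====

-- B replaces A's cascade of early returns by one pass that collects ALL violated messages
-- (required-field messages first, then the six length messages) and reports the first: alternative decomposition, same cost.


-- ===== PORT A =====
-- shared string helper: Python's str.title() (exact on the ASCII field names both programs apply it to)
def pyTitleGo : Bool → List Char → List Char
  | _, [] => []
  | prevAlpha, c :: rest =>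
      (if prevAlpha then PySem.Chars.lowerChar c else PySem.Chars.upperChar c) ::
        pyTitleGo (PySem.Chars.isalpha c) rest

def pyTitle (s : String) : String := String.ofList (pyTitleGo false s.toList)

-- job_data.get(field): dict lookup, none when the key is absent
def vjdGet (job_data : List (String × String)) (k : String) : Option String :=
  PySem.Dict.get? (PySem.Dict.mk job_data) k

-- the required-fields loop of A: first field whose value is falsy (absent or "")
def vjdFirstMissing (job_data : List (String × String)) : List String → Option String
  | [] => none
  | f :: rest =>
      if (vjdGet job_data f).getD "" == "" then some f
      else vjdFirstMissing job_data rest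

def validate_job_description (job_data : List (String × String)) : Bool × String :=
  match vjdFirstMissing job_data ["title", "company", "description", "requirements"] with
  | some f => (false, pyTitle f ++ " is required")
  | none =>
    -- after the loop every field is present, so job_data[field] = (get field).getD "" exactly
    let t := (vjdGet job_data "title").getD ""
    if PySem.Str.len t > 200 then (false, "Job title must be less than 200 characters")
    else
      let c := (vjdGet job_data "company").getD ""
      if PySem.Str.len c > 100 then (false, "Company name must be less than 100 characters")
      else
        let d := (vjdGet job_data "description").getD ""
        if PySem.Str.len d < 50 then (false, "Job description must be at least 50 characters long")
        else if PySem.Str.len d > 10000 then (false, "Job description must be less than 10,000 characters")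
        else
          let r := (vjdGet job_data "requirements").getD ""
          if PySem.Str.len r < 20 then (false, "Job requirements must be at least 20 characters long")
          else if PySem.Str.len r > 5000 then (false, "Job requirements must be less than 5,000 characters")
          else (true, "")

-- ===== PORT B =====
def vjdFields : List String := ["title", "company", "description", "requirements"]

-- n = {f: len(job_data.get(f) or '') for f in fields}
def vjdLens (job_data : List (String × String)) : PySem.Dict String Int :=
  PySem.Dict.ofList (vjdFields.map (fun f => (f, PySem.Str.len ((vjdGet job_data f).getD ""))))

def validate_job_description_alt (job_data : List (String × String)) : Bool × String :=
  let n := vjdLens job_data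
  let failuresReq := vjdFields.filterMap (fun f =>
    if (vjdGet job_data f).getD "" == "" then some (pyTitle f ++ " is required") else none)
  let failures := failuresReq ++
    ([ (PySem.Dict.getD n "title" 0 > 200, "Job title must be less than 200 characters"),
       (PySem.Dict.getD n "company" 0 > 100, "Company name must be less than 100 characters"),
       (PySem.Dict.getD n "description" 0 < 50, "Job description must be at least 50 characters long"),
       (PySem.Dict.getD n "description" 0 > 10000, "Job description must be less than 10,000 characters"),
       (PySem.Dict.getD n "requirements" 0 < 20, "Job requirements must be at least 20 characters long"),
       (PySem.Dict.getD n "requirements" 0 > 5000, "Job requirements must be less than 5,000 characters") ]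
      : List (Bool × String)).filterMap (fun p => if p.1 then some p.2 else none)
  (failures.isEmpty, failures.headD "")

-- ===== PRECONDITION & SPEC =====
def Spec_validate_job_description (job_data : List (String × String)) (out : Bool × String) : Prop := out = validate_job_description_alt job_data
instance (job_data : List (String × String)) (out : Bool × String) : Decidable (Spec_validate_job_description job_data out) := by unfold Spec_validate_job_description; infer_instance

-- ===== CLAIM (what is proved, stated in full; the proofs are below) =====
def Claim_equal_validate_job_description : Prop := ∀ (job_data : List (String × String)), Dom_validate_job_description job_data → Spec_validate_job_description job_data (validate_job_description job_data)

-- ===== LEMMAS AND PROOFS =====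
theorem vjdLens_getD (jd : List (String × String)) (f : String) (hf : f ∈ vjdFields) :
    PySem.Dict.getD (vjdLens jd) f 0 = PySem.Str.len ((vjdGet jd f).getD "") := by
  fin_cases hf <;>
    simp [vjdLens, vjdFields, PySem.Dict.ofList, PySem.Dict.update, PySem.Dict.getD_insert]

-- ===== VERDICT (by name: the statement is the Claim_ definition above) =====
set_option maxHeartbeats 4000000 in
theorem validate_job_description_spec : Claim_equal_validate_job_description := by
  intro jd _
  unfold Spec_validate_job_description
  have e1 := vjdLens_getD jd "title" (by simp [vjdFields])
  have e2 := vjdLens_getD jd "company" (by simp [vjdFields])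
  have e3 := vjdLens_getD jd "description" (by simp [vjdFields])
  have e4 := vjdLens_getD jd "requirements" (by simp [vjdFields])
  simp only [validate_job_description, validate_job_description_alt, vjdFields,
    vjdFirstMissing, e1, e2, e3, e4, List.filterMap_cons, List.filterMap_nil,
    decide_eq_true_eq]
  generalize (vjdGet jd "title").getD "" = t
  generalize (vjdGet jd "company").getD "" = c
  generalize (vjdGet jd "description").getD "" = d
  generalize (vjdGet jd "requirements").getD "" = r
  cases h1 : (t == "") <;> cases h2 : (c == "") <;> cases h3 : (d == "") <;> cases h4 : (r == "") <;>
    simp only [h1, h2, h3, h4, Bool.false_eq_true, if_true, if_false, List.isEmpty,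
      List.headD, List.nil_append, List.cons_append] <;>
    (try rfl) <;>
    (split_ifs <;> rfl)
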